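-- pv_equiv track=rewrite | github.com/eddiethedean/ryact | scripts/apply_parity_burndown_inventory.py | _patch_wave_burndown_v23_react_incremental_error_logging_replay
-- ===== SOURCE A (Python) =====
-- _BURNDOWN_V23_REACT_IMPLEMENTATIONS: tuple[tuple[str, str, str], ...] = (
--     (
--         "react.ReactIncrementalErrorLogging-test.reactincrementalerrorlogging."
--         "should_log_errors_that_occur_during_the_begin_phase",
--         "react.incrementalErrorLogging.beginPhase",
--         "tests_upstream/react/test_incremental_error_logging.py",
--     ),
--     (
--         "react.ReactIncrementalErrorLogging-test.reactincrementalerrorlogging."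
--         "should_log_errors_that_occur_during_the_commit_phase",
--         "react.incrementalErrorLogging.commitPhase",
--         "tests_upstream/react/test_incremental_error_logging.py",
--     ),
--     (
--         "react.ReactIncrementalErrorLogging-test.reactincrementalerrorlogging."
--         "should_ignore_errors_thrown_in_log_method_to_prevent_cycle",
--         "react.incrementalErrorLogging.logMethodCycleGuard",
--         "tests_upstream/react/test_incremental_error_logging.py",
--     ),
--     (
--         "react.ReactIncrementalErrorLogging-test.reactincrementalerrorlogging."
--         "resets_instance_variables_before_unmounting_failed_node",
--         "react.incrementalErrorLogging.resetInstanceStateBeforeUnmountFailedNode",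
--         "tests_upstream/react/test_incremental_error_logging.py",
--     ),
--     (
--         "react.ReactIncrementalErrorReplay-test.reactincrementalerrorreplay."
--         "should_ignore_error_if_it_doesn_t_throw_on_retry",
--         "react.incrementalErrorReplay.ignoreErrorIfRetrySucceeds",
--         "tests_upstream/react/test_incremental_error_replay.py",
--     ),
-- )
--
-- _BURNDOWN_V23_REACT_NON_GOALS: tuple[tuple[str, str], ...] = (
--     (
--         "react.ReactIncrementalErrorLogging-test.reactincrementalerrorlogging."
--         "does_not_report_internal_offscreen_component_for_errors_thrown_during_reconciliation_inside_activity",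
--         (
--             "Deferred: depends on internal Offscreen/Activity fiber reporting semantics "
--             "not modeled by the current noop renderer."
--         ),
--     ),
--     (
--         "react.ReactIncrementalErrorLogging-test.reactincrementalerrorlogging."
--         "does_not_report_internal_offscreen_component_for_errors_thrown_during_reconciliation_inside_suspense",
--         (
--             "Deferred: depends on internal Offscreen/Suspense fiber reporting semantics "
--             "not modeled by the current noop renderer."
--         ),
--     ),
--     (
--         "react.ReactIncrementalErrorReplay-test.reactincrementalerrorreplay."
--         "should_fail_gracefully_on_error_in_the_host_environment",
--         (
--             "Deferred: depends on a host config that can throw 'Error in host config.' "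
--             "during reconciliation/commit."
--         ),
--     ),
-- )
--
-- def _patch_wave_burndown_v23_react_incremental_error_logging_replay(cases: list[dict]) -> int:
--     changed = 0
--     for row_id, manifest_id, py_test in _BURNDOWN_V23_REACT_IMPLEMENTATIONS:
--         for c in cases:
--             if c.get("id") != row_id or c.get("status") != "pending":
--                 continue
--             c["status"] = "implemented"
--             c["manifest_id"] = manifest_id
--             c["python_test"] = py_test
--             c["non_goal_rationale"] = None
--             changed += 1
--             break
--
--     non_goal_by_id = dict(_BURNDOWN_V23_REACT_NON_GOALS)
--     for c in cases:
--         row_id = c.get("id")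
--         if row_id not in non_goal_by_id:
--             continue
--         if c.get("status") != "pending":
--             continue
--         c["status"] = "non_goal"
--         c["manifest_id"] = None
--         c["python_test"] = None
--         c["non_goal_rationale"] = non_goal_by_id[row_id]
--         changed += 1
--
--     return changed
-- ===== SOURCE B (Python) =====
-- _BURNDOWN_V23_REACT_IMPLEMENTATIONS: tuple[tuple[str, str, str], ...] = (
--     (
--         "react.ReactIncrementalErrorLogging-test.reactincrementalerrorlogging."
--         "should_log_errors_that_occur_during_the_begin_phase",
--         "react.incrementalErrorLogging.beginPhase",
--         "tests_upstream/react/test_incremental_error_logging.py",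
--     ),
--     (
--         "react.ReactIncrementalErrorLogging-test.reactincrementalerrorlogging."
--         "should_log_errors_that_occur_during_the_commit_phase",
--         "react.incrementalErrorLogging.commitPhase",
--         "tests_upstream/react/test_incremental_error_logging.py",
--     ),
--     (
--         "react.ReactIncrementalErrorLogging-test.reactincrementalerrorlogging."
--         "should_ignore_errors_thrown_in_log_method_to_prevent_cycle",
--         "react.incrementalErrorLogging.logMethodCycleGuard",
--         "tests_upstream/react/test_incremental_error_logging.py",
--     ),
--     (
--         "react.ReactIncrementalErrorLogging-test.reactincrementalerrorlogging."
--         "resets_instance_variables_before_unmounting_failed_node",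
--         "react.incrementalErrorLogging.resetInstanceStateBeforeUnmountFailedNode",
--         "tests_upstream/react/test_incremental_error_logging.py",
--     ),
--     (
--         "react.ReactIncrementalErrorReplay-test.reactincrementalerrorreplay."
--         "should_ignore_error_if_it_doesn_t_throw_on_retry",
--         "react.incrementalErrorReplay.ignoreErrorIfRetrySucceeds",
--         "tests_upstream/react/test_incremental_error_replay.py",
--     ),
-- )
--
-- _BURNDOWN_V23_REACT_NON_GOALS: tuple[tuple[str, str], ...] = (
--     (
--         "react.ReactIncrementalErrorLogging-test.reactincrementalerrorlogging."
--         "does_not_report_internal_offscreen_component_for_errors_thrown_during_reconciliation_inside_activity",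
--         (
--             "Deferred: depends on internal Offscreen/Activity fiber reporting semantics "
--             "not modeled by the current noop renderer."
--         ),
--     ),
--     (
--         "react.ReactIncrementalErrorLogging-test.reactincrementalerrorlogging."
--         "does_not_report_internal_offscreen_component_for_errors_thrown_during_reconciliation_inside_suspense",
--         (
--             "Deferred: depends on internal Offscreen/Suspense fiber reporting semantics "
--             "not modeled by the current noop renderer."
--         ),
--     ),
--     (
--         "react.ReactIncrementalErrorReplay-test.reactincrementalerrorreplay."
--         "should_fail_gracefully_on_error_in_the_host_environment",
--         (
--             "Deferred: depends on a host config that can throw 'Error in host config.' "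
--             "during reconciliation/commit."
--         ),
--     ),
-- )
--
--
-- def _patch_wave_burndown_v23_react_incremental_error_logging_replay(cases: list[dict]) -> int:
--     # Single pass over cases with prebuilt id indexes; a 'used' set keeps each
--     # implementation id updating at most one case (A's per-tuple break).
--     impl_by_id = {row_id: (m, t) for row_id, m, t in _BURNDOWN_V23_REACT_IMPLEMENTATIONS}
--     non_goal_by_id = dict(_BURNDOWN_V23_REACT_NON_GOALS)
--     used = set()
--     changed = 0
--     for c in cases:
--         if c.get("status") != "pending":
--             continue
--         rid = c.get("id")
--         if rid in impl_by_id and rid not in used: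
--             m, t = impl_by_id[rid]
--             c["status"] = "implemented"
--             c["manifest_id"] = m
--             c["python_test"] = t
--             c["non_goal_rationale"] = None
--             used.add(rid)
--             changed += 1
--         elif rid in non_goal_by_id:
--             c["status"] = "non_goal"
--             c["manifest_id"] = None
--             c["python_test"] = None
--             c["non_goal_rationale"] = non_goal_by_id[rid]
--             changed += 1
--     return changed
-- ===== Notes on version B (the rewrite author's own statement) =====
-- stated objective: simpler
-- what changed: Replaces A's outer loop over the 5-row implementation table with its per-row inner scan of cases (plus a second pass for non-goals) by a single pass over cases using prebuilt id->row dict indexes and a 'used' set that preserves A's first-match-only semantics per implementation id.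
import Mathlib
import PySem

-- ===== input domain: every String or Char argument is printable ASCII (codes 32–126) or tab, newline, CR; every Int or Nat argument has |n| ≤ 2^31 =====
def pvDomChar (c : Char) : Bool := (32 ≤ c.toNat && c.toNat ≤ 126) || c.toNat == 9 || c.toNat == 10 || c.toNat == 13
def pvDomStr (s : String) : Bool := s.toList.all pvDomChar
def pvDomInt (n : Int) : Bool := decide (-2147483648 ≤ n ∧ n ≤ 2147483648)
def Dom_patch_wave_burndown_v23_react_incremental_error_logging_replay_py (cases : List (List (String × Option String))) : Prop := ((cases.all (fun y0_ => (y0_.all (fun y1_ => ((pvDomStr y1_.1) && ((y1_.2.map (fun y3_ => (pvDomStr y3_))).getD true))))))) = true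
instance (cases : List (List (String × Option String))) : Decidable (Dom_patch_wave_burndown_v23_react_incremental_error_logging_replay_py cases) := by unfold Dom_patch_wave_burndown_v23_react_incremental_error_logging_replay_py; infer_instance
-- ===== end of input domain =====

-- B replaces A's outer loop over the implementation table (with an inner scan of `cases` per row)
-- by a single pass over `cases` with prebuilt id indexes and a 'used' set (objective: simpler).
-- Both Pythons mutate the case dicts in place identically; the equivalence proved here is about the
-- returned count (the Int both return).

-- shared data tables (module constants of the Python file)
def implRows : List (String × String × String) := [
  ("react.ReactIncrementalErrorLogging-test.reactincrementalerrorlogging.should_log_errors_that_occur_during_the_begin_phase",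
   "react.incrementalErrorLogging.beginPhase",
   "tests_upstream/react/test_incremental_error_logging.py"),
  ("react.ReactIncrementalErrorLogging-test.reactincrementalerrorlogging.should_log_errors_that_occur_during_the_commit_phase",
   "react.incrementalErrorLogging.commitPhase",
   "tests_upstream/react/test_incremental_error_logging.py"),
  ("react.ReactIncrementalErrorLogging-test.reactincrementalerrorlogging.should_ignore_errors_thrown_in_log_method_to_prevent_cycle",
   "react.incrementalErrorLogging.logMethodCycleGuard",
   "tests_upstream/react/test_incremental_error_logging.py"),
  ("react.ReactIncrementalErrorLogging-test.reactincrementalerrorlogging.resets_instance_variables_before_unmounting_failed_node",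
   "react.incrementalErrorLogging.resetInstanceStateBeforeUnmountFailedNode",
   "tests_upstream/react/test_incremental_error_logging.py"),
  ("react.ReactIncrementalErrorReplay-test.reactincrementalerrorreplay.should_ignore_error_if_it_doesn_t_throw_on_retry",
   "react.incrementalErrorReplay.ignoreErrorIfRetrySucceeds",
   "tests_upstream/react/test_incremental_error_replay.py")]

def ngRows : List (String × String) := [
  ("react.ReactIncrementalErrorLogging-test.reactincrementalerrorlogging.does_not_report_internal_offscreen_component_for_errors_thrown_during_reconciliation_inside_activity",
   "Deferred: depends on internal Offscreen/Activity fiber reporting semantics not modeled by the current noop renderer."),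
  ("react.ReactIncrementalErrorLogging-test.reactincrementalerrorlogging.does_not_report_internal_offscreen_component_for_errors_thrown_during_reconciliation_inside_suspense",
   "Deferred: depends on internal Offscreen/Suspense fiber reporting semantics not modeled by the current noop renderer."),
  ("react.ReactIncrementalErrorReplay-test.reactincrementalerrorreplay.should_fail_gracefully_on_error_in_the_host_environment",
   "Deferred: depends on a host config that can throw 'Error in host config.' during reconciliation/commit.")]

-- c.get(k) on a dict[str, Optional[str]]: missing key and stored None both give None
def pvGet (c : List (String × Option String)) (k : String) : Option String :=
  ((PySem.Dict.mk c).get? k).getD none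
-- c[k] = v (in-place overwrite, insertion order kept)
def pvSet (c : List (String × Option String)) (k : String) (v : Option String) : List (String × Option String) :=
  ((PySem.Dict.mk c).insert k v).items
-- `row_id in non_goal_by_id` (row_id may be None, which is never a key)
def ngMem (rid : Option String) : Bool := match rid with
  | some s => (PySem.Dict.mk ngRows).contains s
  | none => false

-- ===== PORT A =====
-- the four in-place updates of the implementation branch
def updImplA (c : List (String × Option String)) (m t : String) : List (String × Option String) :=
  pvSet (pvSet (pvSet (pvSet c "status" (some "implemented")) "manifest_id" (some m)) "python_test" (some t)) "non_goal_rationale" none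

-- inner `for c in cases: … break`: returns cases with the first pending matching case updated, and whether one was found
def scanA (r m t : String) : List (List (String × Option String)) → List (List (String × Option String)) × Bool
  | [] => ([], false)
  | c :: cs =>
    if !(pvGet c "id" == some r) || !(pvGet c "status" == some "pending") then
      let p := scanA r m t cs
      (c :: p.1, p.2)
    else
      (updImplA c m t :: cs, true)

-- outer `for row_id, manifest_id, py_test in _BURNDOWN_V23_REACT_IMPLEMENTATIONS`
def loop1A : List (String × String × String) → List (List (String × Option String)) × Int → List (List (String × Option String)) × Int
  | [], st => st
  | (r, m, t) :: rest, st =>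
    let p := scanA r m t st.1
    loop1A rest (p.1, if p.2 then st.2 + 1 else st.2)

-- second loop: each case is visited once, so its in-place update never feeds back into the
-- count returned; only `changed` is carried
def loop2A : List (List (String × Option String)) → Int → Int
  | [], n => n
  | c :: cs, n =>
    if !(ngMem (pvGet c "id")) then loop2A cs n
    else if !(pvGet c "status" == some "pending") then loop2A cs n
    else loop2A cs (n + 1)

def patch_wave_burndown_v23_react_incremental_error_logging_replay_py (cases : List (List (String × Option String))) : Int :=
  let p := loop1A implRows (cases, 0)
  loop2A p.1 p.2

-- ===== PORT B =====
-- impl_by_id = {row_id: (m, t) for row_id, m, t in _BURNDOWN_V23_REACT_IMPLEMENTATIONS}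
def implById : PySem.Dict String (String × String) :=
  PySem.Dict.ofList (implRows.map (fun r => (r.1, r.2)))
def implMemB (rid : Option String) : Bool := match rid with
  | some s => implById.contains s
  | none => false
def usedMemB (rid : Option String) (used : List String) : Bool := match rid with
  | some s => used.contains s
  | none => false
def usedAddB (rid : Option String) (used : List String) : List String := match rid with
  | some s => PySem.Set.add used s
  | none => used

-- the single pass; `used` is the set of implementation ids already applied
def loopB : List (List (String × Option String)) → List String → Int → Int
  | [], _, n => n
  | c :: cs, used, n =>
    if !(pvGet c "status" == some "pending") then loopB cs used n
    else
      let rid := pvGet c "id"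
      if implMemB rid && !(usedMemB rid used) then loopB cs (usedAddB rid used) (n + 1)
      else if ngMem rid then loopB cs used (n + 1)
      else loopB cs used n

def patch_wave_burndown_v23_react_incremental_error_logging_replay_py_alt (cases : List (List (String × Option String))) : Int :=
  loopB cases [] 0

-- ===== PRECONDITION & SPEC =====
def Spec_patch_wave_burndown_v23_react_incremental_error_logging_replay_py (cases : List (List (String × Option String))) (out : Int) : Prop := out = patch_wave_burndown_v23_react_incremental_error_logging_replay_py_alt cases
instance (cases : List (List (String × Option String))) (out : Int) : Decidable (Spec_patch_wave_burndown_v23_react_incremental_error_logging_replay_py cases out) := by unfold Spec_patch_wave_burndown_v23_react_incremental_error_logging_replay_py; infer_instance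

-- ===== CLAIM (what is proved, stated in full; the proofs are below) =====
def Claim_equal_patch_wave_burndown_v23_react_incremental_error_logging_replay_py : Prop := ∀ (cases : List (List (String × Option String))), Dom_patch_wave_burndown_v23_react_incremental_error_logging_replay_py cases → Spec_patch_wave_burndown_v23_react_incremental_error_logging_replay_py cases (patch_wave_burndown_v23_react_incremental_error_logging_replay_py cases)

-- ===== LEMMAS AND PROOFS =====

-- proof-side vocabulary
def pendB (c : List (String × Option String)) : Bool := pvGet c "status" == some "pending"
def hasId (r : String) (c : List (String × Option String)) : Bool := pvGet c "id" == some r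
-- "some pending case with id r exists"
def exP (r : String) (cs : List (List (String × Option String))) : Bool :=
  cs.any (fun c => hasId r c && pendB c)
-- "pending case with a non-goal id"
def Pngl (c : List (String × Option String)) : Bool := ngMem (pvGet c "id") && pendB c

-- the common characterisation both programs are proved to compute
def commonCount (cs : List (List (String × Option String))) : Int :=
  ((implRows.filter (fun p => exP p.1 cs)).length : Int) + ((cs.filter Pngl).length : Int)

theorem pvMkItems (d : PySem.Dict String (Option String)) : PySem.Dict.mk d.items = d := rfl

theorem pvGet_pvSet_ne (c : List (String × Option String)) (k k' : String) (v : Option String)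
    (h : k' ≠ k) : pvGet (pvSet c k v) k' = pvGet c k' := by
  simp [pvGet, pvSet, pvMkItems, PySem.Dict.get?_insert, h]

theorem pvGet_pvSet_self (c : List (String × Option String)) (k : String) (v : Option String) :
    pvGet (pvSet c k v) k = v := by
  simp [pvGet, pvSet, pvMkItems, PySem.Dict.get?_insert_self]

theorem pvGet_updImplA_id (c : List (String × Option String)) (m t : String) :
    pvGet (updImplA c m t) "id" = pvGet c "id" := by
  unfold updImplA
  rw [pvGet_pvSet_ne _ _ _ _ (by decide), pvGet_pvSet_ne _ _ _ _ (by decide),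
      pvGet_pvSet_ne _ _ _ _ (by decide), pvGet_pvSet_ne _ _ _ _ (by decide)]

theorem pendB_updImplA (c : List (String × Option String)) (m t : String) :
    pendB (updImplA c m t) = false := by
  unfold pendB updImplA
  rw [pvGet_pvSet_ne _ _ _ _ (by decide), pvGet_pvSet_ne _ _ _ _ (by decide),
      pvGet_pvSet_ne _ _ _ _ (by decide), pvGet_pvSet_self]
  decide

theorem exP_cons (r : String) (c : List (String × Option String)) (cs : List (List (String × Option String))) :
    exP r (c :: cs) = ((hasId r c && pendB c) || exP r cs) := rfl

theorem scanA_cons_skip (r m t : String) (c : List (String × Option String)) (cs : List (List (String × Option String)))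
    (hs : (hasId r c && pendB c) = false) :
    scanA r m t (c :: cs) = (c :: (scanA r m t cs).1, (scanA r m t cs).2) := by
  unfold hasId pendB at hs
  rw [Bool.and_eq_false_iff] at hs
  rcases hs with hs | hs <;> simp [scanA, hs]

theorem scanA_cons_hit (r m t : String) (c : List (String × Option String)) (cs : List (List (String × Option String)))
    (h1 : hasId r c = true) (h2 : pendB c = true) :
    scanA r m t (c :: cs) = (updImplA c m t :: cs, true) := by
  unfold hasId at h1; unfold pendB at h2
  simp [scanA, h1, h2]

theorem scanA_snd (r m t : String) (cs : List (List (String × Option String))) :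
    (scanA r m t cs).2 = exP r cs := by
  induction cs with
  | nil => rfl
  | cons c cs ih =>
    by_cases hs : (hasId r c && pendB c) = true
    · rw [Bool.and_eq_true] at hs
      rw [scanA_cons_hit r m t c cs hs.1 hs.2, exP_cons]
      simp [hs.1, hs.2]
    · rw [Bool.not_eq_true] at hs
      rw [scanA_cons_skip r m t c cs hs, exP_cons, ih, hs]
      simp

theorem scanA_fst_exP (r m t : String) (cs : List (List (String × Option String))) (r' : String)
    (h : r' ≠ r) : exP r' (scanA r m t cs).1 = exP r' cs := by
  induction cs with
  | nil => rfl
  | cons c cs ih =>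
    by_cases hs : (hasId r c && pendB c) = true
    · rw [Bool.and_eq_true] at hs
      have hid : pvGet c "id" = some r := beq_iff_eq.mp hs.1
      have hr' : hasId r' c = false := by
        unfold hasId; rw [hid]; simp [Ne.symm h]
      have hr'u : hasId r' (updImplA c m t) = false := by
        unfold hasId; rw [pvGet_updImplA_id, hid]; simp [Ne.symm h]
      rw [scanA_cons_hit r m t c cs hs.1 hs.2, exP_cons, exP_cons, hr', hr'u, pendB_updImplA]
      simp
    · rw [Bool.not_eq_true] at hs
      rw [scanA_cons_skip r m t c cs hs, exP_cons, exP_cons, ih]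

theorem scanA_fst_Pngl (r m t : String) (cs : List (List (String × Option String)))
    (h : ngMem (some r) = false) :
    ((scanA r m t cs).1.filter Pngl).length = (cs.filter Pngl).length := by
  induction cs with
  | nil => rfl
  | cons c cs ih =>
    by_cases hs : (hasId r c && pendB c) = true
    · rw [Bool.and_eq_true] at hs
      have hid : pvGet c "id" = some r := beq_iff_eq.mp hs.1
      have hc : Pngl c = false := by unfold Pngl; rw [hid, h]; rfl
      have hcu : Pngl (updImplA c m t) = false := by
        unfold Pngl; rw [pvGet_updImplA_id, hid, h]; rfl
      rw [scanA_cons_hit r m t c cs hs.1 hs.2]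
      simp [hc, hcu]
    · rw [Bool.not_eq_true] at hs
      rw [scanA_cons_skip r m t c cs hs]
      simp only [List.filter_cons]
      split_ifs <;> simp [ih]

theorem loop1A_spec (R : List (String × String × String)) (cs : List (List (String × Option String))) (n : Int)
    (hnd : (R.map Prod.fst).Nodup) (hng : ∀ p ∈ R, ngMem (some p.1) = false) :
    (loop1A R (cs, n)).2 = n + ((R.filter (fun p => exP p.1 cs)).length : Int)
    ∧ (∀ r', (∀ p ∈ R, p.1 ≠ r') → exP r' (loop1A R (cs, n)).1 = exP r' cs)
    ∧ ((loop1A R (cs, n)).1.filter Pngl).length = (cs.filter Pngl).length := by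
  induction R generalizing cs n with
  | nil => exact ⟨by simp [loop1A], fun _ _ => rfl, rfl⟩
  | cons p R ih =>
    obtain ⟨r, m, t⟩ := p
    simp only [List.map_cons, List.nodup_cons] at hnd
    have hngr : ngMem (some r) = false := hng (r, m, t) (List.mem_cons_self ..)
    have hngR : ∀ q ∈ R, ngMem (some q.1) = false := fun q hq => hng q (List.mem_cons_of_mem _ hq)
    have hne : ∀ q ∈ R, q.1 ≠ r := by
      intro q hq hqe
      exact hnd.1 (hqe ▸ List.mem_map_of_mem hq)
    set cs1 := (scanA r m t cs).1 with hcs1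
    set n1 : Int := if (scanA r m t cs).2 then n + 1 else n with hn1
    have hstep : loop1A ((r, m, t) :: R) (cs, n) = loop1A R (cs1, n1) := by
      simp [loop1A, hcs1, hn1]
    obtain ⟨ih1, ih2, ih3⟩ := ih cs1 n1 hnd.2 hngR
    have hfc : R.filter (fun q => exP q.1 cs1) = R.filter (fun q => exP q.1 cs) := by
      apply List.filter_congr
      intro q hq
      simp only [hcs1, scanA_fst_exP r m t cs q.1 (hne q hq)]
    refine ⟨?_, ?_, ?_⟩
    · rw [hstep, ih1, hfc, hn1, scanA_snd]
      simp only [List.filter_cons]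
      by_cases he : exP r cs
      · simp [he]; ring
      · simp [he]
    · intro r' hr'
      have h1 : r' ≠ r := fun hh => hr' (r, m, t) (List.mem_cons_self ..) hh.symm
      have h2 : ∀ q ∈ R, q.1 ≠ r' := fun q hq => hr' q (List.mem_cons_of_mem _ hq)
      rw [hstep, ih2 r' h2, hcs1, scanA_fst_exP r m t cs r' h1]
    · rw [hstep, ih3, hcs1, scanA_fst_Pngl r m t cs hngr]

theorem loop2A_spec (cs : List (List (String × Option String))) (n : Int) :
    loop2A cs n = n + ((cs.filter Pngl).length : Int) := by
  induction cs generalizing n with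
  | nil => simp [loop2A]
  | cons c cs ih =>
    by_cases h1 : ngMem (pvGet c "id")
    · by_cases h2 : pendB c
      · have hc : Pngl c = true := by simp [Pngl, h1, h2]
        unfold pendB at h2
        simp [loop2A, h1, h2, ih, hc]
        ring
      · have hc : Pngl c = false := by simp [Pngl, h2]
        unfold pendB at h2
        simp only [Bool.not_eq_true] at h2
        simp [loop2A, h1, h2, ih, hc]
    · have hc : Pngl c = false := by simp [Pngl, h1]
      simp only [Bool.not_eq_true] at h1
      simp [loop2A, h1, ih, hc]

set_option maxRecDepth 10000 in
theorem implRows_nodup : (implRows.map Prod.fst).Nodup := by decide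

set_option maxRecDepth 10000 in
theorem implRows_not_ng : ∀ p ∈ implRows, ngMem (some p.1) = false := by decide

set_option maxRecDepth 10000 in
theorem implById_keys : implById.keys = implRows.map Prod.fst := by decide

theorem implMemB_iff (s : String) : implMemB (some s) = true ↔ s ∈ implRows.map Prod.fst := by
  unfold implMemB
  rw [PySem.Dict.contains_iff_mem_keys, implById_keys]

theorem ngMem_false_of_implKey (s : String) (h : s ∈ implRows.map Prod.fst) :
    ngMem (some s) = false := by
  rcases List.mem_map.mp h with ⟨p, hp, rfl⟩
  exact implRows_not_ng p hp

theorem implKey_ne_of_ngMem (s : String) (h : ngMem (some s) = true) :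
    ∀ p ∈ implRows, p.1 ≠ s := by
  intro p hp hps
  rw [← hps] at h
  rw [implRows_not_ng p hp] at h
  cases h

theorem A_eq_commonCount (cases : List (List (String × Option String))) :
    patch_wave_burndown_v23_react_incremental_error_logging_replay_py cases = commonCount cases := by
  obtain ⟨h1, _, h3⟩ := loop1A_spec implRows cases 0 implRows_nodup implRows_not_ng
  unfold patch_wave_burndown_v23_react_incremental_error_logging_replay_py commonCount
  rw [loop2A_spec, h1, h3]
  ring

theorem filter_len_succ {α : Type} (key : α → String) (s : String) :
    ∀ (L : List α) (f g : α → Bool), (L.map key).Nodup → s ∈ L.map key →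
    (∀ x ∈ L, key x = s → f x = true) → (∀ x ∈ L, key x = s → g x = false) →
    (∀ x ∈ L, key x ≠ s → f x = g x) →
    (L.filter f).length = (L.filter g).length + 1 := by
  intro L
  induction L with
  | nil => intro f g _ hmem; simp at hmem
  | cons x L ih =>
    intro f g hnd hmem hf hg hfg
    simp only [List.map_cons, List.nodup_cons] at hnd
    by_cases hx : key x = s
    · have hfx := hf x (List.mem_cons_self ..) hx
      have hgx := hg x (List.mem_cons_self ..) hx
      have heq : L.filter f = L.filter g := by
        apply List.filter_congr
        intro y hy
        refine hfg y (List.mem_cons_of_mem _ hy) ?_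
        intro hys
        exact hnd.1 (by rw [← hx] at hys; exact hys ▸ List.mem_map_of_mem hy)
      simp [hfx, hgx, heq]
    · have hfx : f x = g x := hfg x (List.mem_cons_self ..) hx
      have hmem' : s ∈ L.map key := by
        rcases List.mem_cons.mp hmem with h | h
        · exact absurd h.symm hx
        · exact h
      have := ih f g hnd.2 hmem' (fun y hy => hf y (List.mem_cons_of_mem _ hy))
        (fun y hy => hg y (List.mem_cons_of_mem _ hy)) (fun y hy => hfg y (List.mem_cons_of_mem _ hy))
      simp only [List.filter_cons, hfx]
      split_ifs <;> simp [this]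

theorem loopB_spec (cs : List (List (String × Option String))) :
    ∀ (used : List String) (n : Int),
    loopB cs used n = n + ((implRows.filter (fun p => exP p.1 cs && !(used.contains p.1))).length : Int)
      + ((cs.filter Pngl).length : Int) := by
  induction cs with
  | nil => intro used n; simp [loopB]
  | cons c cs ih =>
    intro used n
    by_cases hp : pendB c
    · rcases hrid : pvGet c "id" with _ | s
      · -- id is None: neither table matches
        have hstep : loopB (c :: cs) used n = loopB cs used n := by
          unfold pendB at hp
          simp [loopB, hp, hrid, implMemB, ngMem]
        have hPc : Pngl c = false := by simp [Pngl, ngMem, hrid]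
        have hfe : implRows.filter (fun p => exP p.1 (c :: cs) && !(used.contains p.1))
                 = implRows.filter (fun p => exP p.1 cs && !(used.contains p.1)) := by
          apply List.filter_congr
          intro p _
          rw [exP_cons]
          simp [hasId, hrid]
        rw [hstep, ih used n, hfe]
        simp [hPc]
      · by_cases him : implMemB (some s) = true
        · have hsmem : s ∈ implRows.map Prod.fst := (implMemB_iff s).mp him
          have hngs : ngMem (some s) = false := ngMem_false_of_implKey s hsmem
          have hPc : Pngl c = false := by simp [Pngl, hrid, hngs]
          by_cases hus : used.contains s = true
          · -- already used: no branch fires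
            have husm : s ∈ used := by simpa [List.contains_iff_mem] using hus
            have hstep : loopB (c :: cs) used n = loopB cs used n := by
              unfold pendB at hp
              simp [loopB, hp, hrid, him, usedMemB, husm, hngs]
            have hfe : implRows.filter (fun p => exP p.1 (c :: cs) && !(used.contains p.1))
                     = implRows.filter (fun p => exP p.1 cs && !(used.contains p.1)) := by
              apply List.filter_congr
              intro p _
              by_cases hps : p.1 = s
              · rw [hps, hus]
                simp
              · rw [exP_cons]
                have : hasId p.1 c = false := by simp [hasId, hrid, Ne.symm hps]
                simp [this]
            rw [hstep, ih used n, hfe]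
            simp [hPc]
          · -- implementation branch fires
            have husm : s ∉ used := by simpa [List.contains_iff_mem] using hus
            have hstep : loopB (c :: cs) used n = loopB cs (PySem.Set.add used s) (n + 1) := by
              unfold pendB at hp
              simp [loopB, hp, hrid, him, usedMemB, husm, usedAddB]
            have hlen : (implRows.filter (fun p => exP p.1 (c :: cs) && !(used.contains p.1))).length
                      = (implRows.filter (fun p => exP p.1 cs && !((PySem.Set.add used s).contains p.1))).length + 1 := by
              apply filter_len_succ Prod.fst s implRows _ _ implRows_nodup hsmem
              · intro p _ hps
                subst hps
                rw [exP_cons]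
                have h1 : hasId p.1 c = true := by simp [hasId, hrid]
                simp [h1, hp, husm]
              · intro p _ hps
                subst hps
                simp [PySem.Set.mem_add]
              · intro p _ hps
                rw [exP_cons]
                have h1 : hasId p.1 c = false := by simp [hasId, hrid, Ne.symm hps]
                simp [h1, PySem.Set.mem_add, hps]
            rw [hstep, ih (PySem.Set.add used s) (n + 1), hlen]
            simp [hPc]
            ring
        · by_cases hng2 : ngMem (some s) = true
          · -- non-goal branch fires
            have hstep : loopB (c :: cs) used n = loopB cs used (n + 1) := by
              unfold pendB at hp
              simp [loopB, hp, hrid, him, hng2]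
            have hPc : Pngl c = true := by simp [Pngl, hrid, hng2, hp]
            have hfe : implRows.filter (fun p => exP p.1 (c :: cs) && !(used.contains p.1))
                     = implRows.filter (fun p => exP p.1 cs && !(used.contains p.1)) := by
              apply List.filter_congr
              intro p hpm
              rw [exP_cons]
              have hps := implKey_ne_of_ngMem s hng2 p hpm
              have : hasId p.1 c = false := by
                simp [hasId, hrid, Ne.symm hps]
              simp [this]
            rw [hstep, ih used (n + 1), hfe]
            simp [hPc]
            ring
          · -- id in neither table
            have hstep : loopB (c :: cs) used n = loopB cs used n := by
              unfold pendB at hp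
              simp [loopB, hp, hrid, him, hng2]
            have hsnot : s ∉ implRows.map Prod.fst := fun hmem => him ((implMemB_iff s).mpr hmem)
            have hPc : Pngl c = false := by simp [Pngl, hrid, hng2]
            have hfe : implRows.filter (fun p => exP p.1 (c :: cs) && !(used.contains p.1))
                     = implRows.filter (fun p => exP p.1 cs && !(used.contains p.1)) := by
              apply List.filter_congr
              intro p hpm
              rw [exP_cons]
              have hps : p.1 ≠ s := fun hh => hsnot (hh ▸ List.mem_map_of_mem hpm)
              have : hasId p.1 c = false := by simp [hasId, hrid, Ne.symm hps]
              simp [this]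
            rw [hstep, ih used n, hfe]
            simp [hPc]
    · -- not pending
      have hstep : loopB (c :: cs) used n = loopB cs used n := by
        unfold pendB at hp
        simp [loopB, hp]
      have hPc : Pngl c = false := by simp [Pngl, hp]
      have hfe : implRows.filter (fun p => exP p.1 (c :: cs) && !(used.contains p.1))
               = implRows.filter (fun p => exP p.1 cs && !(used.contains p.1)) := by
        apply List.filter_congr
        intro p _
        rw [exP_cons]
        simp [hp]
      rw [hstep, ih used n, hfe]
      simp [hPc]

theorem B_eq_commonCount (cases : List (List (String × Option String))) :
    patch_wave_burndown_v23_react_incremental_error_logging_replay_py_alt cases = commonCount cases := by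
  unfold patch_wave_burndown_v23_react_incremental_error_logging_replay_py_alt commonCount
  rw [loopB_spec]
  have : (implRows.filter (fun p => exP p.1 cases && !(([] : List String).contains p.1)))
       = implRows.filter (fun p => exP p.1 cases) := by
    apply List.filter_congr
    intro x _
    simp only [List.contains_nil, Bool.not_false, Bool.and_true]
  rw [this]
  ring

-- ===== VERDICT (by name: the statement is the Claim_ definition above) =====
theorem patch_wave_burndown_v23_react_incremental_error_logging_replay_py_spec : Claim_equal_patch_wave_burndown_v23_react_incremental_error_logging_replay_py := by
  intro cases _
  unfold Spec_patch_wave_burndown_v23_react_incremental_error_logging_replay_py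
  rw [A_eq_commonCount, B_eq_commonCount]
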